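-- pv_equiv track=rewrite | github.com/DieterJoubert/advent_of_code | 2023/day_03.py | get_number_and_neighbors
-- ===== SOURCE A (Python) =====
-- def get_neighbors(data, i, j):
-- 	neighbors = []
--
-- 	for i_delta in [-1, 0, 1]:
-- 		for j_delta in [-1, 0, 1]:
-- 			if i_delta == j_delta == 0:
-- 				continue
--
-- 			try:
-- 				neighbor = data[i+i_delta][j+j_delta]
-- 				neighbors.append(neighbor)
-- 			except:
-- 				pass
--
-- 	return neighbors
--
-- def get_number_and_neighbors(data):
-- 	number_and_neighbors = []
--
-- 	for i in range(len(data)):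
-- 		this_row = data[i]
--
-- 		current_num = ''
-- 		current_neighbors = []
--
-- 		for j in range(len(this_row)):
-- 			this_cell = data[i][j]
--
-- 			if this_cell.isnumeric():
-- 				current_num += this_cell
-- 				neighbors = get_neighbors(data, i, j)
-- 				for n in neighbors:
-- 						current_neighbors.append(n)
--
-- 			elif current_num:
-- 				number_and_neighbors.append([int(current_num), current_neighbors])
-- 				current_num = ''
-- 				current_neighbors = []
--
-- 		if current_num:
-- 			number_and_neighbors.append([int(current_num), current_neighbors])
-- 			current_num = ''
-- 			current_neighbors = []
--
-- 	return number_and_neighbors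
-- ===== SOURCE B (Python) =====
-- def get_number_and_neighbors(data):
-- 	out = []
-- 	for i, row in enumerate(data):
-- 		j, n = 0, len(row)
-- 		while j < n:
-- 			if not row[j].isnumeric():
-- 				j += 1
-- 				continue
-- 			k = j + 1
-- 			while k < n and row[k].isnumeric():
-- 				k += 1
-- 			neighbors = []
-- 			for c in range(j, k):
-- 				for di in (-1, 0, 1):
-- 					for dj in (-1, 0, 1):
-- 						if di == 0 == dj:
-- 							continue
-- 						try:
-- 							neighbors.append(data[i + di][c + dj])
-- 						except IndexError:
-- 							pass
-- 			out.append([int(''.join(row[j:k])), neighbors])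
-- 			j = k
-- 	return out
-- ===== Notes on version B (the rewrite author's own statement) =====
-- stated objective: alternative
-- what changed: Replaces A's char-by-char accumulate-and-flush scan with per-row run decomposition: maximal numeric runs are located first, the number comes from int(''.join(...)) on the run, and neighbors are gathered per run column with try/except direct indexing.
import Mathlib
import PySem

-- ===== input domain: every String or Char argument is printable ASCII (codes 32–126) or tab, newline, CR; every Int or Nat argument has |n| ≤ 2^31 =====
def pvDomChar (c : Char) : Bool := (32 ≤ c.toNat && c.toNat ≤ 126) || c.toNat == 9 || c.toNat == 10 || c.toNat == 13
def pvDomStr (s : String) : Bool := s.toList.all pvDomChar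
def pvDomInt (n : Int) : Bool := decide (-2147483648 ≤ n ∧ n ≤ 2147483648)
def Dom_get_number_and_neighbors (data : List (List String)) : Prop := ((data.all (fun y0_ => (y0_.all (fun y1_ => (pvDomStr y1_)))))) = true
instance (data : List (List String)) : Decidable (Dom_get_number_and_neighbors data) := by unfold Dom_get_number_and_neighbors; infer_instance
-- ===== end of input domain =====

-- B replaces A's char-by-char accumulate-and-flush scan by a run-decomposition of each row
-- (maximal numeric runs, number from a join of the run, neighbors gathered per run column):
-- objective 'alternative' (same asymptotic cost, different decomposition).


-- ===== PORT A =====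
-- str.isnumeric() is ported as PySem.Str.strIsdigit: on the printable-ASCII domain Dom the two
-- predicates agree (both are 'nonempty and all of 0-9'); both ports use the same predicate.
-- try/except around data[i+di][j+dj] = the bind of two pyGet? (none = IndexError, skipped).
def get_neighbors (data : List (List String)) (i j : Int) : List String :=
  ([-1, 0, 1] : List Int).foldl (fun nbs i_delta =>
    ([-1, 0, 1] : List Int).foldl (fun nbs j_delta =>
      if i_delta = 0 ∧ j_delta = 0 then nbs
      else
        match (PySem.List.pyGet? data (i + i_delta)).bind
                (fun row => PySem.List.pyGet? row (j + j_delta)) with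
        | some n => nbs ++ [n]
        | none => nbs) nbs) []

-- A's inner loop 'for j in range(len(this_row)): this_cell = data[i][j]' as the structural
-- recursion over this_row carrying the column index j and the state (acc, current_num,
-- current_neighbors); data[i][j] is the traversed cell (i, j always in range here).
-- int(current_num) is ported as (PySem.Int.ofStr? num).getD 0: exact, since A only converts a
-- nonempty all-digit string (guarded by 'current_num' being truthy).
def gnaRow (data : List (List String)) (i : Int) :
    List String → Int → (List (Int × List String) × String × List String) →
    List (Int × List String) × String × List String
  | [], _, st => st
  | this_cell :: rest, j, (acc, num, nbrs) =>
    gnaRow data i rest (j + 1)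
      (if PySem.Str.strIsdigit this_cell then
        (acc, num ++ this_cell, nbrs ++ get_neighbors data i j)
      else if num ≠ "" then
        (acc ++ [((PySem.Int.ofStr? num).getD 0, nbrs)], "", [])
      else (acc, num, nbrs))

-- A's outer loop 'for i in range(len(data))' as recursion over data's rows carrying i and acc,
-- with the end-of-row flush of a pending number.
def gnaRows (data : List (List String)) :
    List (List String) → Int → List (Int × List String) → List (Int × List String)
  | [], _, acc => acc
  | this_row :: rest, i, acc =>
    match gnaRow data i this_row 0 (acc, "", []) with
    | (acc', num, nbrs) =>
      gnaRows data rest (i + 1)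
        (if num ≠ "" then acc' ++ [((PySem.Int.ofStr? num).getD 0, nbrs)] else acc')

def get_number_and_neighbors (data : List (List String)) : List (Int × List String) :=
  gnaRows data data 0 []

-- ===== PORT B =====
-- B's per-cell delta loops for cell (i, c): 'try: append(data[i+di][c+dj]) except IndexError: pass'
-- = flatMap emitting [cell] when both pyGet? succeed, [] on IndexError.
def nbCell (data : List (List String)) (i c : Int) : List String :=
  ([-1, 0, 1] : List Int).flatMap (fun di =>
    ([-1, 0, 1] : List Int).flatMap (fun dj =>
      if di = 0 ∧ dj = 0 then []
      else
        match (PySem.List.pyGet? data (i + di)).bind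
                (fun row => PySem.List.pyGet? row (c + dj)) with
        | some n => [n]
        | none => []))

-- B's while-loop over a row: skip a non-numeric cell, else take the maximal numeric run
-- row[j:k] (the inner 'while k < n and row[k].isnumeric()' = takeWhile on the rest),
-- emit [int(''.join(run)), neighbors of its columns], continue after the run.
def gnbRow (data : List (List String)) (i : Int) :
    List String → Int → List (Int × List String)
  | [], _ => []
  | c :: rest, j =>
    if PySem.Str.strIsdigit c then
      let run := c :: rest.takeWhile (fun s => PySem.Str.strIsdigit s)
      ((PySem.Int.ofStr? (PySem.Str.join "" run)).getD 0,
        (PySem.List.pyRange j (j + (run.length : Int)) 1).flatMap (fun col => nbCell data i col))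
        :: gnbRow data i (rest.dropWhile (fun s => PySem.Str.strIsdigit s)) (j + (run.length : Int))
    else gnbRow data i rest (j + 1)
  termination_by cells _ => cells.length
  decreasing_by
  · simpa using Nat.lt_succ_of_le (List.length_dropWhile_le _ _)
  · simp

def gnbRows (data : List (List String)) :
    List (List String) → Int → List (Int × List String)
  | [], _ => []
  | row :: rest, i => gnbRow data i row 0 ++ gnbRows data rest (i + 1)

def get_number_and_neighbors_alt (data : List (List String)) : List (Int × List String) :=
  gnbRows data data 0

-- ===== PRECONDITION & SPEC =====
def Spec_get_number_and_neighbors (data : List (List String)) (out : List (Int × List String)) : Prop := out = get_number_and_neighbors_alt data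
instance (data : List (List String)) (out : List (Int × List String)) : Decidable (Spec_get_number_and_neighbors data out) := by unfold Spec_get_number_and_neighbors; infer_instance

-- ===== CLAIM (what is proved, stated in full; the proofs are below) =====
def Claim_equal_get_number_and_neighbors : Prop := ∀ (data : List (List String)), Dom_get_number_and_neighbors data → Spec_get_number_and_neighbors data (get_number_and_neighbors data)

-- ===== LEMMAS AND PROOFS =====

theorem app_match (nbs : List String) (o : Option String) :
    (match o with | some n => nbs ++ [n] | none => nbs) =
    nbs ++ (match o with | some n => [n] | none => []) := by cases o <;> simp

-- A's foldl neighbor accumulation = B's flatMap of per-delta contributions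
theorem gn_eq (data : List (List String)) (i j : Int) :
    get_neighbors data i j = nbCell data i j := by
  unfold get_neighbors nbCell
  simp only [List.foldl_cons, List.foldl_nil, List.flatMap_cons, List.flatMap_nil, app_match]
  simp

-- end-of-row flush, as a proof-side helper
def flushRow (st : List (Int × List String) × String × List String) : List (Int × List String) :=
  match st with
  | (acc, num, nbrs) => if num ≠ "" then acc ++ [((PySem.Int.ofStr? num).getD 0, nbrs)] else acc

theorem join_cons (c : String) (l : List String) :
    PySem.Str.join "" (c :: l) = c ++ PySem.Str.join "" l := by
  apply String.ext
  simp only [String.toList_append, PySem.Str.toList_join, List.map_cons]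
  cases l with
  | nil => simp [PySem.Chars.join_nil, PySem.Chars.join_singleton]
  | cons d rest => simp [PySem.Chars.join_cons_cons]

theorem join_nonempty (c : String) (l : List String) (hc : PySem.Str.strIsdigit c = true) :
    PySem.Str.join "" (c :: l) ≠ "" := by
  intro h
  rw [join_cons] at h
  have h' : c = "" ∧ PySem.Chars.join [] (l.map String.toList) = [] := by
    simpa using congrArg String.toList h
  rw [h'.1] at hc
  exact absurd hc (by decide)

-- A consumes a run of digit cells by accumulating them into (num, nbrs)
theorem run_eq (data : List (List String)) (i : Int) (run : List String)
    (h : ∀ c ∈ run, PySem.Str.strIsdigit c = true) :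
    ∀ (rest : List String) (j : Int) acc (num : String) (nbrs : List String),
    gnaRow data i (run ++ rest) j (acc, num, nbrs) =
      gnaRow data i rest (j + (run.length : Int))
        (acc, num ++ PySem.Str.join "" run,
          nbrs ++ (PySem.List.pyRange j (j + (run.length : Int)) 1).flatMap
            (fun col => nbCell data i col)) := by
  induction run with
  | nil =>
    intro rest j acc num nbrs
    have hj : PySem.Str.join "" ([] : List String) = "" := by
      apply String.ext; simp [PySem.Str.toList_join, PySem.Chars.join_nil]
    simp [PySem.List.pyRange_one_eq_nil (le_refl j), hj]
  | cons c run' ih =>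
    intro rest j acc num nbrs
    have hc : PySem.Str.strIsdigit c = true := h c (by simp)
    have hall : ∀ x ∈ run', PySem.Str.strIsdigit x = true := fun x hx => h x (by simp [hx])
    simp only [List.cons_append, gnaRow, hc, if_pos]
    rw [ih hall]
    have hrange : PySem.List.pyRange j (j + 1 + (run'.length : Int)) 1 =
        j :: PySem.List.pyRange (j + 1) (j + 1 + (run'.length : Int)) 1 :=
      PySem.List.pyRange_one_cons (by omega)
    push_cast [List.length_cons]
    rw [show j + ((run'.length : Int) + 1) = j + 1 + (run'.length : Int) by ring, hrange]
    simp [join_cons, gn_eq, String.append_assoc]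

-- the row-level equivalence: A's scan (from a clean state), flushed, = B's run decomposition
-- (fuel n bounds the length of the remaining row suffix, since B jumps over whole runs)
theorem row_eq_aux (data : List (List String)) (i : Int) :
    ∀ (n : Nat) (cells : List String), cells.length ≤ n → ∀ (j : Int) acc,
    flushRow (gnaRow data i cells j (acc, "", [])) = acc ++ gnbRow data i cells j := by
  intro n
  induction n with
  | zero =>
    intro cells hlen j acc
    obtain rfl : cells = [] := List.eq_nil_of_length_eq_zero (Nat.le_zero.mp hlen)
    simp [gnaRow, gnbRow, flushRow]
  | succ n ih =>
    intro cells hlen j acc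
    match cells with
    | [] => simp [gnaRow, gnbRow, flushRow]
    | c :: rest =>
      by_cases hc : PySem.Str.strIsdigit c = true
      · have hall : ∀ x ∈ c :: rest.takeWhile (fun s => PySem.Str.strIsdigit s),
            PySem.Str.strIsdigit x = true := by
          intro x hx
          rcases List.mem_cons.mp hx with rfl | hx'
          · exact hc
          · exact List.mem_takeWhile_imp hx'
        have hsplit : c :: rest =
            (c :: rest.takeWhile (fun s => PySem.Str.strIsdigit s)) ++
              rest.dropWhile (fun s => PySem.Str.strIsdigit s) := by
          simp [List.takeWhile_append_dropWhile]
        have hA := run_eq data i _ hall (rest.dropWhile (fun s => PySem.Str.strIsdigit s)) j acc "" []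
        rw [← hsplit] at hA
        have hne : PySem.Str.join "" (c :: rest.takeWhile (fun s => PySem.Str.strIsdigit s)) ≠ "" :=
          join_nonempty c _ hc
        cases hrest' : rest.dropWhile (fun s => PySem.Str.strIsdigit s) with
        | nil =>
          rw [hrest'] at hA
          rw [hA]
          simp only [gnaRow, flushRow]
          rw [if_pos (by simpa using hne)]
          have hc' : PySem.Chars.strIsdigit c.toList = true := by
            simpa [PySem.Str.strIsdigit_eq] using hc
          have hrest'' : List.dropWhile (fun s => PySem.Chars.strIsdigit s.toList) rest = [] := by
            simpa [PySem.Str.strIsdigit_eq] using hrest'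
          simp [hc', hrest'', gnbRow]
        | cons d rest2 =>
          have hd : PySem.Str.strIsdigit d = false := by
            have h0 := List.head_dropWhile_not (fun s => PySem.Str.strIsdigit s) (l := rest)
              (by rw [hrest']; simp)
            simp only [hrest', List.head_cons] at h0
            exact h0
          rw [hrest'] at hA
          rw [hA]
          have hlen2 : rest2.length ≤ n := by
            have h1 : (d :: rest2).length ≤ rest.length := by
              rw [← hrest']; exact List.length_dropWhile_le _ _
            simp only [List.length_cons] at h1 hlen
            omega
          simp only [gnaRow, hd]
          rw [if_neg (by simp), if_pos (by simpa using hne)]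
          rw [ih rest2 hlen2 _ _]
          conv_rhs => rw [gnbRow]
          simp only [hc, if_pos, hrest']
          rw [gnbRow]
          simp only [hd]
          simp [List.append_assoc]
      · simp only [gnaRow, hc]
        rw [if_neg (by simp), if_neg (by simp)]
        rw [ih rest (by simpa using Nat.lt_succ_iff.mp (by simpa using hlen)) (j + 1) acc]
        have hc' : ¬PySem.Chars.strIsdigit c.toList = true := by
          simpa [PySem.Str.strIsdigit_eq] using hc
        conv_rhs => rw [gnbRow]
        simp [hc']

theorem row_eq (data : List (List String)) (i : Int) :
    ∀ (cells : List String) (j : Int) acc,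
    flushRow (gnaRow data i cells j (acc, "", [])) = acc ++ gnbRow data i cells j :=
  fun cells j acc => row_eq_aux data i cells.length cells le_rfl j acc

theorem rows_eq (data : List (List String)) :
    ∀ (rows : List (List String)) (i : Int) acc,
    gnaRows data rows i acc = acc ++ gnbRows data rows i := by
  intro rows
  induction rows with
  | nil => intro i acc; simp [gnaRows, gnbRows]
  | cons row rest ih =>
    intro i acc
    have hrow := row_eq data i row 0 acc
    simp only [gnaRows, gnbRows]
    cases hst : gnaRow data i row 0 (acc, "", []) with
    | mk acc' st2 =>
      cases st2 with
      | mk num nbrs =>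
        rw [ih]
        rw [hst] at hrow
        simp only [flushRow] at hrow
        rw [hrow]
        simp [List.append_assoc]

-- ===== VERDICT (by name: the statement is the Claim_ definition above) =====
theorem get_number_and_neighbors_spec : Claim_equal_get_number_and_neighbors := by
  intro data _
  unfold Spec_get_number_and_neighbors get_number_and_neighbors get_number_and_neighbors_alt
  simpa using rows_eq data data 0 []
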